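-- pv_equiv track=rewrite | github.com/zhanglab/dl-toda | vis_scripts/get_coverage.py | extend_cigar
-- ===== SOURCE A (Python) =====
-- def extend_cigar(cigar):
--     new_cigar = ''
--     num = ''
--     for i in cigar:
--         if i.isnumeric():
--             num += i
--         else:
--             new_cigar += i*int(num)
--             num = ''
--     return new_cigar
-- ===== SOURCE B (Python) =====
-- def extend_cigar(cigar):
--     # Parse (digits+, op) tokens by slicing instead of a char-by-char state machine.
--     parts = []
--     rest = cigar
--     while rest:
--         k = 0
--         while k < len(rest) and rest[k].isnumeric():
--             k += 1
--         if k == len(rest):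
--             break
--         parts.append(rest[k] * int(rest[:k]))
--         rest = rest[k+1:]
--     return ''.join(parts)
-- ===== Notes on version B (the rewrite author's own statement) =====
-- stated objective: idiomatic
-- what changed: Replaces A's character-by-character digit-accumulating state machine with a slice-based token parser: repeatedly take the digit prefix, emit op*int(count), and advance past the op, joining the pieces at the end.
import Mathlib
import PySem

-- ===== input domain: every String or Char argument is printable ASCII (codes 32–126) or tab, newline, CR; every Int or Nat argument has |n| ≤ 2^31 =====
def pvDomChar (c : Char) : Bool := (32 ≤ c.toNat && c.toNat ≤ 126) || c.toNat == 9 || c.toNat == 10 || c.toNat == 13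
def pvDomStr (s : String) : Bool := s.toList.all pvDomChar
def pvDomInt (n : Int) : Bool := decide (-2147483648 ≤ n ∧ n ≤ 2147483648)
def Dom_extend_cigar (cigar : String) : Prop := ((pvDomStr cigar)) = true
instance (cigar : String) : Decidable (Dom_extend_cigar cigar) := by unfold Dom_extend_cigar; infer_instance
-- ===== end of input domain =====

-- B replaces A's char-by-char digit-accumulating state machine with a slice-based
-- token parser (count-prefix + op, join of pieces); objective: idiomatic/alternative.
-- On the ASCII domain Python's str.isnumeric coincides with PySem.Chars.isdigit ('0'..'9').

-- ===== PORT A =====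
-- A's loop: state (new_cigar, num); int(num) on an empty num raises (excluded by Pre_; getD 0 there).
def pvA_loop : List Char → List Char → List Char → List Char
  | [], newc, _ => newc
  | c :: rest, newc, num =>
    if PySem.Chars.isdigit c then
      pvA_loop rest newc (num ++ [c])
    else
      pvA_loop rest (newc ++ PySem.List.pyRepeat [c] ((PySem.Int.ofChars? num).getD 0)) []

def extend_cigar (cigar : String) : String := String.mk (pvA_loop cigar.toList [] [])

-- ===== PORT B =====
-- B's inner while: length of the digit prefix.
def pvDigitsLen : List Char → Nat
  | [] => 0
  | c :: r => if PySem.Chars.isdigit c then pvDigitsLen r + 1 else 0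

-- B's outer while over the remaining string, collecting pieces.
def pvB_loop : List Char → List (List Char) → List (List Char)
  | [], parts => parts
  | c :: r, parts =>
    let k := pvDigitsLen (c :: r)
    if k = r.length + 1 then parts
    else
      pvB_loop (r.drop k)
        (parts ++ [PySem.List.pyRepeat [(c :: r).getD k ' ']
                    ((PySem.Int.ofChars? ((c :: r).take k)).getD 0)])
  termination_by rest _ => rest.length
  decreasing_by simp [List.length_drop]

def extend_cigar_alt (cigar : String) : String :=
  String.mk (pvB_loop cigar.toList []).flatten

-- ===== PRECONDITION & SPEC =====
-- Pre_ excludes exactly the inputs where A raises ValueError (int of an empty count at an op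
-- character not immediately preceded by a digit); B raises the same error there.
def Pre_extend_cigar (cigar : String) : Prop :=
  ∀ i < cigar.toList.length,
    PySem.Chars.isdigit (cigar.toList.getD i ' ') = false →
      0 < i ∧ PySem.Chars.isdigit (cigar.toList.getD (i - 1) ' ') = true
instance (cigar : String) : Decidable (Pre_extend_cigar cigar) := by
  unfold Pre_extend_cigar; infer_instance
def pvWitness_extend_cigar : String := "3M1I12D"

def Spec_extend_cigar (cigar : String) (out : String) : Prop := out = extend_cigar_alt cigar
instance (cigar : String) (out : String) : Decidable (Spec_extend_cigar cigar out) := by unfold Spec_extend_cigar; infer_instance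

-- ===== CLAIM (what is proved, stated in full; the proofs are below) =====
def Claim_equal_extend_cigar : Prop := ∀ (cigar : String), Dom_extend_cigar cigar → Pre_extend_cigar cigar → Spec_extend_cigar cigar (extend_cigar cigar)

-- ===== LEMMAS AND PROOFS =====

-- list-level precondition
def pvPreL (cs : List Char) : Prop :=
  ∀ i < cs.length,
    PySem.Chars.isdigit (cs.getD i ' ') = false →
      0 < i ∧ PySem.Chars.isdigit (cs.getD (i - 1) ' ') = true

theorem pvA_digits (ds : List Char) (hds : ∀ c ∈ ds, PySem.Chars.isdigit c = true) :
    ∀ t newc num, pvA_loop (ds ++ t) newc num = pvA_loop t newc (num ++ ds) := by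
  induction ds with
  | nil => intro t newc num; simp
  | cons d ds ih =>
    intro t newc num
    have hd : PySem.Chars.isdigit d = true := hds d (by simp)
    simp only [List.cons_append, pvA_loop, hd, if_pos]
    rw [ih (fun c hc => hds c (by simp [hc]))]
    simp

theorem pvDigitsLen_eq (cs : List Char) :
    pvDigitsLen cs = (cs.takeWhile PySem.Chars.isdigit).length := by
  induction cs with
  | nil => rfl
  | cons c r ih =>
    by_cases h : PySem.Chars.isdigit c = true
    · simp [pvDigitsLen, h, ih]
    · simp at h; simp [pvDigitsLen, h]

theorem pvGetD_app_right (l l' : List Char) (n : Nat) (h : l.length ≤ n) :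
    (l ++ l').getD n ' ' = l'.getD (n - l.length) ' ' := by
  simp [List.getD_eq_getElem?_getD, List.getElem?_append_right h]

theorem pvB_acc_aux : ∀ n rest, rest.length ≤ n →
    ∀ parts, pvB_loop rest parts = parts ++ pvB_loop rest [] := by
  intro n
  induction n with
  | zero =>
    intro rest hlen parts
    have : rest = [] := List.eq_nil_of_length_eq_zero (by omega)
    subst this; simp [pvB_loop]
  | succ n ih =>
    intro rest hlen parts
    cases rest with
    | nil => simp [pvB_loop]
    | cons c r =>
      simp only [pvB_loop]
      by_cases hk : pvDigitsLen (c :: r) = r.length + 1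
      · simp [hk]
      · rw [if_neg hk, if_neg hk,
            ih (r.drop (pvDigitsLen (c :: r))) (by simp at hlen ⊢; omega),
            ih (r.drop (pvDigitsLen (c :: r))) (by simp at hlen ⊢; omega)
              (([] : List (List Char)) ++ _)]
        simp

theorem pvB_acc (rest : List Char) :
    ∀ parts, pvB_loop rest parts = parts ++ pvB_loop rest [] :=
  pvB_acc_aux rest.length rest (le_refl _)

theorem pvPreL_tail (ds : List Char) (c : Char) (t : List Char)
    (_hds : ∀ x ∈ ds, PySem.Chars.isdigit x = true)
    (hc : PySem.Chars.isdigit c = false)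
    (h : pvPreL (ds ++ c :: t)) : pvPreL t := by
  intro i hi hnd
  have hidx : ds.length + 1 + i < (ds ++ c :: t).length := by simp; omega
  have hget : (ds ++ c :: t).getD (ds.length + 1 + i) ' ' = t.getD i ' ' := by
    rw [pvGetD_app_right _ _ _ (by omega)]
    have : ds.length + 1 + i - ds.length = i + 1 := by omega
    rw [this]; rfl
  have h2 := h (ds.length + 1 + i) hidx (by rw [hget]; exact hnd)
  rcases h2 with ⟨-, hprev⟩
  have hprevIdx : ds.length + 1 + i - 1 = ds.length + i := by omega
  rw [hprevIdx] at hprev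
  cases i with
  | zero =>
    -- predecessor is c, which is not a digit: contradiction
    exfalso
    have : (ds ++ c :: t).getD (ds.length + 0) ' ' = c := by
      rw [pvGetD_app_right _ _ _ (by omega)]; simp
    rw [this] at hprev
    rw [hprev] at hc; cases hc
  | succ j =>
    refine ⟨by omega, ?_⟩
    have : (ds ++ c :: t).getD (ds.length + (j + 1)) ' ' = t.getD j ' ' := by
      rw [pvGetD_app_right _ _ _ (by omega)]
      have : ds.length + (j + 1) - ds.length = j + 1 := by omega
      rw [this]; rfl
    rw [this] at hprev
    simpa using hprev

theorem pvPreL_head_digit (cs : List Char) (h : pvPreL cs)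
    (hne : cs ≠ []) : PySem.Chars.isdigit (cs.getD 0 ' ') = true := by
  by_contra hnd
  have hlen : 0 < cs.length := List.length_pos_of_ne_nil hne
  have := h 0 hlen (by simpa using eq_false_of_ne_true hnd)
  omega

theorem pv_dropWhile_head (p : Char → Bool) :
    ∀ (l : List Char) c t, l.dropWhile p = c :: t → p c = false := by
  intro l
  induction l with
  | nil => intro c t h; cases h
  | cons a r ih =>
    intro c t h
    by_cases hp : p a = true
    · rw [List.dropWhile_cons_of_pos hp] at h; exact ih _ _ h
    · rw [List.dropWhile_cons_of_neg hp] at h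
      cases h; simpa using hp

-- main: A's loop from empty state equals acc ++ flatten of B's pieces, under pvPreL
theorem pv_main : ∀ n cs, cs.length ≤ n → pvPreL cs →
    ∀ acc, pvA_loop cs acc [] = acc ++ (pvB_loop cs []).flatten := by
  intro n
  induction n with
  | zero =>
    intro cs hlen _ acc
    have : cs = [] := List.eq_nil_of_length_eq_zero (by omega)
    subst this; simp [pvA_loop, pvB_loop]
  | succ n ih =>
    intro cs hlen hpre acc
    by_cases hne : cs = []
    · subst hne; simp [pvA_loop, pvB_loop]
    · have hsplit0 : cs.takeWhile PySem.Chars.isdigit ++ cs.dropWhile PySem.Chars.isdigit = cs :=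
        List.takeWhile_append_dropWhile
      have hdsall : ∀ x ∈ cs.takeWhile PySem.Chars.isdigit, PySem.Chars.isdigit x = true :=
        fun x hx => List.mem_takeWhile_imp hx
      cases hrest : cs.dropWhile PySem.Chars.isdigit with
      | nil =>
        -- all digits: A returns acc, B produces no pieces
        rw [hrest, List.append_nil] at hsplit0
        have hall : ∀ x ∈ cs, PySem.Chars.isdigit x = true := hsplit0 ▸ hdsall
        have hArun : pvA_loop cs acc [] = acc := by
          have := pvA_digits cs hall [] acc []
          simpa [pvA_loop] using this
        have hk : pvDigitsLen cs = cs.length := by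
          rw [pvDigitsLen_eq, hsplit0]
        have hBrun : pvB_loop cs [] = [] := by
          cases hcs : cs with
          | nil => simp [pvB_loop]
          | cons c r =>
            rw [hcs] at hk
            simp only [pvB_loop]
            rw [if_pos (by simpa using hk)]
        rw [hArun, hBrun]; simp
      | cons c t =>
        have hc : PySem.Chars.isdigit c = false :=
          pv_dropWhile_head _ cs c t hrest
        rw [hrest] at hsplit0
        set ds := cs.takeWhile PySem.Chars.isdigit with hds_def
        -- ds ≠ []
        have hdsne : ds ≠ [] := by
          intro h0
          rw [h0] at hsplit0; simp at hsplit0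
          have := pvPreL_head_digit cs hpre hne
          rw [← hsplit0] at this; simp at this
          rw [this] at hc; cases hc
        have hdslen : 0 < ds.length := List.length_pos_of_ne_nil hdsne
        -- A side
        have hA : pvA_loop cs acc [] =
            pvA_loop t (acc ++ PySem.List.pyRepeat [c] ((PySem.Int.ofChars? ds).getD 0)) [] := by
          rw [← hsplit0, pvA_digits ds hdsall]
          simp [pvA_loop, hc]
        -- B side: one step
        have hklen : pvDigitsLen cs = ds.length := by
          rw [pvDigitsLen_eq, ← hds_def]
        have hB : pvB_loop cs [] =
            PySem.List.pyRepeat [c] ((PySem.Int.ofChars? ds).getD 0) :: pvB_loop t [] := by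
          cases hcs : cs with
          | nil => exact absurd hcs hne
          | cons c0 r =>
            rw [hcs] at hklen hsplit0
            have hlt : ds.length < r.length + 1 := by
              have : (c0 :: r).length = ds.length + (c :: t).length := by
                rw [← hsplit0]; simp
              simp at this; omega
            simp only [pvB_loop]
            rw [if_neg (by omega)]
            have htake : (c0 :: r).take (pvDigitsLen (c0 :: r)) = ds := by
              rw [hklen, ← hsplit0, List.take_left]
            have hgd : (c0 :: r).getD (pvDigitsLen (c0 :: r)) ' ' = c := by
              rw [hklen, ← hsplit0, pvGetD_app_right _ _ _ (le_refl _)]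
              simp
            have hdrop : r.drop (pvDigitsLen (c0 :: r)) = t := by
              have h2 : (c0 :: r).drop (pvDigitsLen (c0 :: r) + 1) = t := by
                rw [hklen, ← hsplit0]
                have h3 : ds ++ c :: t = (ds ++ [c]) ++ t := by simp
                rw [h3, show ds.length + 1 = (ds ++ [c]).length by simp, List.drop_left]
              simpa using h2
            rw [htake, hgd, hdrop, pvB_acc]
            simp
        -- combine with IH on t
        have hpret : pvPreL t := by
          apply pvPreL_tail ds c t hdsall hc
          rw [hsplit0]; exact hpre
        have hlt : t.length ≤ n := by
          have : cs.length = ds.length + t.length + 1 := by rw [← hsplit0]; simp; omega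
          omega
        rw [hA, ih t hlt hpret, hB]
        simp

-- ===== VERDICT (by name: the statement is the Claim_ definition above) =====
theorem extend_cigar_spec : Claim_equal_extend_cigar := by
  intro cigar _ hpre
  unfold Spec_extend_cigar extend_cigar extend_cigar_alt
  rw [pv_main cigar.toList.length cigar.toList (le_refl _) hpre []]
  simp
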